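-- pv_equiv track=rewrite | github.com/ryantigi254/FSD-Mental-Health-Safety-Benchmark | Assignment 2/reliable_clinical_benchmark/Uni-setup/scripts/scan_repetition.py | has_consecutive_line_repeats
-- ===== SOURCE A (Python) =====
-- def has_consecutive_line_repeats(text: str, min_len: int = 30, min_repeats: int = 3) -> bool:
--     lines = [l.strip() for l in text.splitlines() if l.strip()]
--     if len(lines) < min_repeats:
--         return False
--     count = 1
--     prev = lines[0]
--     for line in lines[1:]:
--         if line == prev and len(line) >= min_len:
--             count += 1
--             if count >= min_repeats:
--                 return True
--         else:
--             prev = line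
--             count = 1
--     return False
-- ===== SOURCE B (Python) =====
-- def has_consecutive_line_repeats(text: str, min_len: int = 30, min_repeats: int = 3) -> bool:
--     # Brute-force sliding window: True iff some window of k = max(min_repeats, 2)
--     # consecutive nonempty stripped lines consists of k copies of one long line.
--     lines = [l.strip() for l in text.splitlines() if l.strip()]
--     k = max(min_repeats, 2)
--     return any(
--         len(lines[i]) >= min_len and lines[i:i + k] == [lines[i]] * k
--         for i in range(len(lines) - k + 1)
--     )
-- ===== Notes on version B (the rewrite author's own statement) =====
-- stated objective: alternative
-- what changed: Replaces A's one-pass prev/count state machine with a brute-force sliding-window search: B slices every window of k = max(min_repeats, 2) consecutive stripped lines and tests whether it equals k copies of one long line.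
-- outside the precondition, e.g. on has_consecutive_line_repeats('', 30, 0): A raises IndexError, B returns False
import Mathlib
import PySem

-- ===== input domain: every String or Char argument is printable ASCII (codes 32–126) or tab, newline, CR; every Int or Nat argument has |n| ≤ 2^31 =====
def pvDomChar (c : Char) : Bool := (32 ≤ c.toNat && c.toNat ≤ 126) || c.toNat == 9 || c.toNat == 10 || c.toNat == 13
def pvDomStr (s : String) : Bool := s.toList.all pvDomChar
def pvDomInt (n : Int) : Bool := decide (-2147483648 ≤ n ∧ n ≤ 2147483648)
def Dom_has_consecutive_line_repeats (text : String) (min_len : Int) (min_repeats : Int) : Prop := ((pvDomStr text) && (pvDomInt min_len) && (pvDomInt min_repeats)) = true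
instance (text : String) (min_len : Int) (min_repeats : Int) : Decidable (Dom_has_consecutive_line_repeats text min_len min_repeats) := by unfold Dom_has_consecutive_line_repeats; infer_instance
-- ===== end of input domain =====

-- B replaces A's stateful prev/count scan by a brute-force sliding-window check (any window of k = max(min_repeats,2) equal long lines); equivalence proved on Pre_ (A raises IndexError when there are no nonempty lines and min_repeats <= 0).


-- shared by both ports (the identical list comprehension both Pythons start with)
def pvLines (text : String) : List String :=
  ((PySem.Str.splitlines text).map PySem.Str.strip).filter (fun l => l ≠ "")

-- ===== PORT A =====
def pvLoopA (min_len min_repeats : Int) : List String → String → Int → Bool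
  | [], _, _ => false
  | line :: rest, prev, count =>
      if line = prev ∧ min_len ≤ PySem.Str.len line then
        if min_repeats ≤ count + 1 then true
        else pvLoopA min_len min_repeats rest prev (count + 1)
      else pvLoopA min_len min_repeats rest line 1

def has_consecutive_line_repeats (text : String) (min_len : Int) (min_repeats : Int) : Bool :=
  let lines := pvLines text
  if (lines.length : Int) < min_repeats then false
  else
    match lines with
    | [] => false  -- Python's `lines[0]` raises IndexError here; excluded by Pre_
    | prev :: rest => pvLoopA min_len min_repeats rest prev 1

-- ===== PORT B =====
def has_consecutive_line_repeats_alt (text : String) (min_len : Int) (min_repeats : Int) : Bool :=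
  let lines := pvLines text
  let k : Int := max min_repeats 2
  (PySem.List.pyRange 0 ((lines.length : Int) - k + 1) 1).any fun i =>
    match PySem.List.pyGet? lines i with  -- lines[i]; i is always in range here
    | some x => decide (min_len ≤ PySem.Str.len x) &&
        (PySem.List.slice lines (some i) (some (i + k)) == List.replicate k.toNat x)
    | none => false

-- ===== PRECONDITION & SPEC =====
-- Pre_ excludes exactly the inputs where A raises IndexError: no nonempty stripped line and min_repeats ≤ 0.
def Pre_has_consecutive_line_repeats (text : String) (min_len : Int) (min_repeats : Int) : Prop :=
  pvLines text ≠ [] ∨ 1 ≤ min_repeats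

instance (text : String) (min_len : Int) (min_repeats : Int) : Decidable (Pre_has_consecutive_line_repeats text min_len min_repeats) := by unfold Pre_has_consecutive_line_repeats; infer_instance

def pvWitness_has_consecutive_line_repeats : String × Int × Int := ("aaaa\naaaa\naaaa", 2, 3)

def Spec_has_consecutive_line_repeats (text : String) (min_len : Int) (min_repeats : Int) (out : Bool) : Prop := out = has_consecutive_line_repeats_alt text min_len min_repeats
instance (text : String) (min_len : Int) (min_repeats : Int) (out : Bool) : Decidable (Spec_has_consecutive_line_repeats text min_len min_repeats out) := by unfold Spec_has_consecutive_line_repeats; infer_instance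

-- ===== CLAIM (what is proved, stated in full; the proofs are below) =====
def Claim_equal_has_consecutive_line_repeats : Prop := ∀ (text : String) (min_len : Int) (min_repeats : Int), Dom_has_consecutive_line_repeats text min_len min_repeats → Pre_has_consecutive_line_repeats text min_len min_repeats → Spec_has_consecutive_line_repeats text min_len min_repeats (has_consecutive_line_repeats text min_len min_repeats)

-- ===== LEMMAS AND PROOFS =====

-- the common ground both sides are reduced to: some k consecutive equal long lines occur
def pvQ (ml : Int) (k : Nat) (l : List String) : Prop :=
  ∃ x, ml ≤ PySem.Str.len x ∧ List.replicate k x <:+: l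

-- a replicate-block infix of `replicate c a ++ y :: t` that is longer than c and
-- whose value differs from a or from y must lie entirely inside `y :: t`
theorem pvRepInfix {α : Type} (x a y : α) (c k : Nat) (t : List α)
    (h : List.replicate k x <:+: List.replicate c a ++ y :: t)
    (hk : c < k) (hxy : x ≠ a ∨ x ≠ y) :
    List.replicate k x <:+: y :: t := by
  obtain ⟨u, v, huv⟩ := h
  have huv' : u ++ (List.replicate k x ++ v) = List.replicate c a ++ y :: t := by
    simpa [List.append_assoc] using huv
  by_cases hu : c ≤ u.length
  · -- block starts at or after y: it is contained in the suffix y :: t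
    have h2 : List.drop c u ++ (List.replicate k x ++ v) = y :: t := by
      have hd := congrArg (List.drop c) huv'
      rwa [List.drop_append_of_le_length hu, List.drop_append_of_le_length (by simp),
        List.drop_replicate, Nat.sub_self, List.replicate_zero, List.nil_append] at hd
    exact ⟨List.drop c u, v, by rw [← h2]; simp [List.append_assoc]⟩
  · -- block overlaps the leading replicate: x = a and x = y, contradicting hxy
    push_neg at hu
    have hgetx : ∀ (j : Nat), j < k →
        (List.replicate c a ++ y :: t)[u.length + j]? = some x := by
      intro j hj
      rw [← huv', List.getElem?_append_right (by omega), Nat.add_sub_cancel_left,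
        List.getElem?_append_left (by simpa using hj)]
      simp [hj]
    have hxa : x = a := by
      have h0 := hgetx 0 (by omega)
      rw [Nat.add_zero, List.getElem?_append_left (by simpa using hu)] at h0
      simp [hu] at h0
      exact h0.symm
    have hxyy : x = y := by
      have hc := hgetx (c - u.length) (by omega)
      rw [show u.length + (c - u.length) = c by omega,
        List.getElem?_append_right (by simp), List.length_replicate, Nat.sub_self] at hc
      simp at hc
      exact hc.symm
    rcases hxy with h | h
    · exact absurd hxa h
    · exact absurd hxyy h

-- a replicate block of the run's value, of length ≤ the run, is an infix
theorem pvRepPrefix (x : String) (k c : Nat) (rest : List String) (hkc : k ≤ c) :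
    List.replicate k x <:+: List.replicate c x ++ rest := by
  have h1 : List.replicate k x <+: List.replicate c x := by
    have ht := List.take_prefix k (List.replicate c x)
    rwa [List.take_replicate, min_eq_left hkc] at ht
  exact (h1.trans (List.prefix_append _ rest)).isInfix

-- absorb one more copy of the run value into the leading replicate
theorem pvRepShift (c : Nat) (a : String) (rest : List String) :
    List.replicate c a ++ a :: rest = List.replicate (c + 1) a ++ rest := by
  simp [List.replicate_succ']

-- A's counter loop, having just consumed c copies of prev, fires iff k consecutive
-- equal long lines occur in (replicate c prev ++ remaining input)
theorem pvLoopA_iff (ml mr : Int) (k : Nat) (hk : (k : Int) = max mr 2) :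
    ∀ (l : List String) (prev : String) (c : Nat), 1 ≤ c → c < k →
      (pvLoopA ml mr l prev (c : Int) = true ↔ pvQ ml k (List.replicate c prev ++ l)) := by
  intro l
  induction l with
  | nil =>
    intro prev c _ hck
    simp only [pvLoopA, pvQ, List.append_nil]
    constructor
    · intro h; cases h
    · rintro ⟨x, _, hinf⟩
      have := List.IsInfix.length_le hinf
      simp at this; omega
  | cons line rest ih =>
    intro prev c hc1 hck
    by_cases hbr : line = prev ∧ ml ≤ PySem.Str.len line
    · obtain ⟨hline, hlong⟩ := hbr
      subst hline
      rw [pvRepShift]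
      by_cases hmr : mr ≤ (c : Int) + 1
      · have : pvLoopA ml mr (line :: rest) line (c : Int) = true := by
          simp only [pvLoopA]
          rw [if_pos ⟨trivial, hlong⟩, if_pos hmr]
        rw [this]
        simp only [true_iff]
        exact ⟨line, hlong, pvRepPrefix line k (c+1) rest (by omega)⟩
      · have hstep : pvLoopA ml mr (line :: rest) line (c : Int) =
            pvLoopA ml mr rest line ((c : Int) + 1) := by
          simp only [pvLoopA]
          rw [if_pos ⟨trivial, hlong⟩, if_neg hmr]
        rw [hstep, show ((c : Int) + 1) = (((c + 1 : Nat)) : Int) by push_cast; omega]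
        exact ih line (c+1) (by omega) (by omega)
    · have hstep : pvLoopA ml mr (line :: rest) prev (c : Int) =
          pvLoopA ml mr rest line 1 := by
        simp only [pvLoopA]
        rw [if_neg hbr]
      rw [hstep, show (1 : Int) = ((1 : Nat) : Int) from rfl]
      rw [ih line 1 le_rfl (by omega)]
      simp only [pvQ, List.replicate_one, List.singleton_append]
      constructor
      · rintro ⟨x, hx, hinf⟩
        exact ⟨x, hx, hinf.trans ⟨List.replicate c prev, [], by simp⟩⟩
      · rintro ⟨x, hx, hinf⟩
        refine ⟨x, hx, pvRepInfix x prev line c k rest hinf hck ?_⟩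
        by_cases hxp : x = prev
        · rcases Decidable.em (line = prev) with he | he
          · exfalso; exact hbr ⟨he, by rw [he, ← hxp]; exact hx⟩  -- needs prev long: x = prev gives it
          · exact Or.inr (by rw [hxp]; exact fun h => he h.symm)
        · exact Or.inl hxp

-- B's window search fires iff k consecutive equal long lines occur in `lines`
theorem pvAltB_iff (ml : Int) (kI : Int) (k : Nat) (hk2 : 2 ≤ kI) (hkk : kI = (k : Int))
    (lines : List String) :
    (((PySem.List.pyRange 0 ((lines.length : Int) - kI + 1) 1).any fun i =>
        match PySem.List.pyGet? lines i with
        | some x => decide (ml ≤ PySem.Str.len x) &&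
            (PySem.List.slice lines (some i) (some (i + kI)) == List.replicate kI.toNat x)
        | none => false) = true) ↔ pvQ ml k lines := by
  subst hkk
  rw [List.any_eq_true]
  constructor
  · rintro ⟨i, hmem, hi⟩
    rw [PySem.List.mem_pyRange_one] at hmem
    obtain ⟨hi0, hilt⟩ := hmem
    obtain ⟨j, rfl⟩ : ∃ j : Nat, i = (j : Int) := ⟨i.toNat, (Int.toNat_of_nonneg hi0).symm⟩
    have hjk : j + k ≤ lines.length := by omega
    have hget : PySem.List.pyGet? lines (j : Int) = some (lines[j]'(by omega)) := by
      simp [PySem.List.pyGet?_natCast, List.getElem?_eq_getElem (show j < lines.length by omega)]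
    rw [hget] at hi
    simp only [Bool.and_eq_true, decide_eq_true_eq, beq_iff_eq] at hi
    obtain ⟨hlong, hslice⟩ := hi
    rw [show ((j : Int) + (k : Int)) = (((j + k : Nat)) : Int) by push_cast; ring,
      PySem.List.slice_natCast, Int.toNat_natCast,
      show j + k - j = k by omega] at hslice
    refine ⟨lines[j]'(by omega), hlong, ?_⟩
    refine ⟨lines.take j, lines.drop (j + k), ?_⟩
    rw [← hslice, ← List.drop_drop, List.append_assoc, List.take_append_drop,
      List.take_append_drop]
  · rintro ⟨x, hx, u, v, huv⟩
    have huv' : u ++ (List.replicate k x ++ v) = lines := by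
      simpa [List.append_assoc] using huv
    have hlen : u.length + (k + v.length) = lines.length := by
      rw [← huv']; simp
    refine ⟨(u.length : Int), ?_, ?_⟩
    · rw [PySem.List.mem_pyRange_one]
      constructor
      · omega
      · push_cast; omega
    · have hget : PySem.List.pyGet? lines (u.length : Int) = some x := by
        rw [PySem.List.pyGet?_natCast, ← huv',
          List.getElem?_append_right (le_refl u.length), Nat.sub_self,
          List.getElem?_append_left (by simp; omega)]
        simp [show 0 < k by omega]
      rw [hget]
      simp only [Bool.and_eq_true, decide_eq_true_eq, beq_iff_eq]
      refine ⟨hx, ?_⟩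
      rw [show ((u.length : Int) + (k : Int)) = (((u.length + k : Nat)) : Int) by push_cast; ring,
        PySem.List.slice_natCast, Int.toNat_natCast,
        show u.length + k - u.length = k by omega, ← huv', List.drop_left]
      exact List.take_left' (by simp)

-- ===== VERDICT (by name: the statement is the Claim_ definition above) =====
theorem has_consecutive_line_repeats_spec : Claim_equal_has_consecutive_line_repeats := by
  intro text ml mr _ hpre
  unfold Spec_has_consecutive_line_repeats
  rw [Bool.eq_iff_iff]
  set k : Nat := (max mr 2).toNat with hkdef
  have hk2 : (2 : Int) ≤ max mr 2 := le_max_right mr 2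
  have hkI : ((k : Nat) : Int) = max mr 2 := by rw [hkdef]; exact Int.toNat_of_nonneg (by omega)
  simp only [has_consecutive_line_repeats, has_consecutive_line_repeats_alt]
  rw [pvAltB_iff ml (max mr 2) k hk2 hkI.symm (pvLines text)]
  cases hL : pvLines text with
  | nil =>
    simp only [List.length_nil]
    constructor
    · intro h; split at h <;> cases h
    · rintro ⟨x, _, hinf⟩
      have := List.IsInfix.length_le hinf
      simp at this; omega
  | cons p rest =>
    by_cases hg : ((p :: rest).length : Int) < mr
    · rw [if_pos hg]
      constructor
      · intro h; cases h
      · rintro ⟨x, _, hinf⟩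
        have := List.IsInfix.length_le hinf
        simp only [List.length_replicate, List.length_cons] at this hg
        omega
    · rw [if_neg hg]
      have h1k : 1 < k := by omega
      have := pvLoopA_iff ml mr k hkI rest p 1 le_rfl h1k
      rw [show ((1 : Nat) : Int) = (1 : Int) from rfl] at this
      rw [this]
      simp [pvQ]
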